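-- pv_equiv track=rewrite | github.com/bitwisecook/tcl-lsp | core/refactoring/_extract_datagroup.py | _tokenise_switch_body
-- ===== SOURCE A (Python) =====
-- def _tokenise_switch_body(text: str) -> list[str]:
--     """Simple brace-aware tokeniser."""
--     tokens: list[str] = []
--     i = 0
--     n = len(text)
--     while i < n:
--         while i < n and text[i] in " \t\n\r":
--             i += 1
--         if i >= n:
--             break
--         if text[i] == "{":
--             depth = 1
--             start = i
--             i += 1
--             while i < n and depth > 0:
--                 if text[i] == "{":
--                     depth += 1
--                 elif text[i] == "}":
--                     depth -= 1
--                 i += 1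
--             tokens.append(text[start:i])
--         elif text[i] == '"':
--             start = i
--             i += 1
--             while i < n and text[i] != '"':
--                 if text[i] == "\\":
--                     i += 1
--                 i += 1
--             if i < n:
--                 i += 1
--             tokens.append(text[start:i])
--         else:
--             start = i
--             while i < n and text[i] not in " \t\n\r{}":
--                 i += 1
--             tokens.append(text[start:i])
--     return tokens
-- ===== SOURCE B (Python) =====
-- def _tokenise_switch_body(text: str) -> list[str]:
--     """Single-pass state machine: IDLE / BRACE(depth) / QUOTE(escape) / WORD over one buffer."""
--     tokens: list[str] = []
--     state = "idle"
--     buf: list[str] = []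
--     depth = 0
--     esc = False
--     for c in text:
--         if state == "idle":
--             if c in " \t\n\r":
--                 pass
--             elif c == "{":
--                 buf = ["{"]
--                 depth = 1
--                 state = "brace"
--             elif c == '"':
--                 buf = ['"']
--                 esc = False
--                 state = "quote"
--             elif c == "}":
--                 tokens.append("}")
--             else:
--                 buf = [c]
--                 state = "word"
--         elif state == "brace":
--             buf.append(c)
--             if c == "{":
--                 depth += 1
--             elif c == "}":
--                 depth -= 1
--                 if depth == 0:
--                     tokens.append("".join(buf))
--                     state = "idle"
--         elif state == "quote":
--             buf.append(c)
--             if esc: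
--                 esc = False
--             elif c == "\\":
--                 esc = True
--             elif c == '"':
--                 tokens.append("".join(buf))
--                 state = "idle"
--         else:  # word
--             if c in " \t\n\r":
--                 tokens.append("".join(buf))
--                 state = "idle"
--             elif c == "{":
--                 tokens.append("".join(buf))
--                 buf = ["{"]
--                 depth = 1
--                 state = "brace"
--             elif c == "}":
--                 tokens.append("".join(buf))
--                 tokens.append("}")
--                 state = "idle"
--             else:
--                 buf.append(c)
--     if state != "idle":
--         tokens.append("".join(buf))
--     return tokens
-- ===== Notes on version B (the rewrite author's own statement) =====
-- stated objective: alternative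
-- what changed: A's index-driven outer loop with three nested scanning loops is replaced by a single pass over the characters driven by an explicit state machine (IDLE / IN_BRACE with depth / IN_QUOTE with escape flag / IN_WORD) over one buffer, with an EOF flush.
-- outside the precondition, e.g. on _tokenise_switch_body('}'): A does not finish within the time limit, B returns ['}']
import Mathlib
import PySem

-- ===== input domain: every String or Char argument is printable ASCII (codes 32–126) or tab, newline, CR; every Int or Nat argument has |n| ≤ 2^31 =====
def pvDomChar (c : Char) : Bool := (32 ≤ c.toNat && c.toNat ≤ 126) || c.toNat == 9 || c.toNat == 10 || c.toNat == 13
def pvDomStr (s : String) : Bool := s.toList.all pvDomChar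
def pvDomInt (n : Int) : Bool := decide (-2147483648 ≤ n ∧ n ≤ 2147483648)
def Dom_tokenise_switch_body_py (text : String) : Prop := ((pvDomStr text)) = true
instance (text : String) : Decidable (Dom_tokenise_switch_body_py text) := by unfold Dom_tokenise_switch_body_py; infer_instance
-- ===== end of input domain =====

-- B re-implements A's index-driven tokeniser as a single-pass state machine (IDLE/BRACE/QUOTE/WORD) over one buffer;
-- objective: alternative decomposition, same O(n) cost. A loops forever on a top-level '}', hence the Pre_ below.

-- ===== PORT A =====
def pvWsA (c : Char) : Bool := c = ' ' || c = '\t' || c = '\n' || c = '\r'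
def pvStopA (c : Char) : Bool := pvWsA c || c = '{' || c = '}'

-- inner brace loop of A: returns (consumed chars, remainder)
def pvDepth (d : Nat) (c : Char) : Nat :=
  if c = '{' then d + 1 else if c = '}' then d - 1 else d

def pvScanBrace : Nat → List Char → List Char × List Char
  | _, [] => ([], [])
  | d, c :: r =>
    if pvDepth d c = 0 then ([c], r)
    else
      let p := pvScanBrace (pvDepth d c) r
      (c :: p.1, p.2)

-- inner quote loop of A ('\\' skips the next char; an unterminated quote consumes to the end)
def pvScanQuote : List Char → List Char × List Char
  | [] => ([], [])
  | '"' :: r => (['"'], r)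
  | '\\' :: [] => (['\\'], [])
  | '\\' :: c2 :: r2 =>
    let p := pvScanQuote r2
    ('\\' :: c2 :: p.1, p.2)
  | c :: r =>
    let p := pvScanQuote r
    (c :: p.1, p.2)

-- outer while loop of A; fuel because A itself does not terminate on a top-level '}' (excluded in Pre_)
def pvTokA : Nat → List Char → List String
  | 0, _ => []
  | f + 1, l =>
    match l.dropWhile pvWsA with
    | [] => []
    | c :: r =>
      if c = '{' then
        let p := pvScanBrace 1 r
        String.ofList ('{' :: p.1) :: pvTokA f p.2
      else if c = '"' then
        let p := pvScanQuote r
        String.ofList ('"' :: p.1) :: pvTokA f p.2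
      else
        String.ofList ((c :: r).takeWhile (fun x => !pvStopA x)) ::
          pvTokA f ((c :: r).dropWhile (fun x => !pvStopA x))

def tokenise_switch_body_py (text : String) : List String :=
  pvTokA (text.toList.length + 1) text.toList

-- ===== PORT B =====
def pvWsB (c : Char) : Bool := c = ' ' || c = '\t' || c = '\n' || c = '\r'

inductive PvSt : Type
  | idle : PvSt
  | brace : List Char → Nat → PvSt
  | quote : List Char → Bool → PvSt
  | word : List Char → PvSt
deriving Repr, DecidableEq

def pvStepB : List String × PvSt → Char → List String × PvSt
  | (toks, .idle), c =>
    if pvWsB c then (toks, .idle)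
    else if c = '{' then (toks, .brace ['{'] 1)
    else if c = '"' then (toks, .quote ['"'] false)
    else if c = '}' then (toks ++ ["}"], .idle)
    else (toks, .word [c])
  | (toks, .brace acc d), c =>
    let acc' := acc ++ [c]
    if c = '{' then (toks, .brace acc' (d + 1))
    else if c = '}' then
      if d = 1 then (toks ++ [String.ofList acc'], .idle)
      else (toks, .brace acc' (d - 1))
    else (toks, .brace acc' d)
  | (toks, .quote acc esc), c =>
    let acc' := acc ++ [c]
    if esc then (toks, .quote acc' false)
    else if c = '\\' then (toks, .quote acc' true)
    else if c = '"' then (toks ++ [String.ofList acc'], .idle)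
    else (toks, .quote acc' false)
  | (toks, .word acc), c =>
    if pvWsB c then (toks ++ [String.ofList acc], .idle)
    else if c = '{' then (toks ++ [String.ofList acc], .brace ['{'] 1)
    else if c = '}' then (toks ++ [String.ofList acc, "}"], .idle)
    else (toks, .word (acc ++ [c]))

def pvFlush : List String × PvSt → List String
  | (toks, .idle) => toks
  | (toks, .brace acc _) => toks ++ [String.ofList acc]
  | (toks, .quote acc _) => toks ++ [String.ofList acc]
  | (toks, .word acc) => toks ++ [String.ofList acc]

def tokenise_switch_body_py_alt (text : String) : List String :=
  pvFlush (text.toList.foldl pvStepB ([], .idle))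

-- ===== PRECONDITION & SPEC =====
-- Pre_ excludes exactly the inputs on which the Python A never returns: A's word branch makes no
-- progress on a '}' met at token-start position (outside any brace or quote token), appending ""
-- forever.  pvOkStep tracks only the scanning mode (no tokens) and reports such a stray '}'.
inductive PvM : Type
  | idle : PvM
  | brace : Nat → PvM
  | quote : Bool → PvM
  | word : PvM
deriving Repr, DecidableEq

def pvOkStep : List Char → PvM → Bool
  | [], _ => true
  | c :: r, .idle =>
    if (c = ' ' || c = '\t' || c = '\n' || c = '\r') then pvOkStep r .idle
    else if c = '{' then pvOkStep r (.brace 1)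
    else if c = '"' then pvOkStep r (.quote false)
    else if c = '}' then false
    else pvOkStep r .word
  | c :: r, .brace d =>
    if c = '{' then pvOkStep r (.brace (d + 1))
    else if c = '}' then (if d = 1 then pvOkStep r .idle else pvOkStep r (.brace (d - 1)))
    else pvOkStep r (.brace d)
  | c :: r, .quote esc =>
    if esc then pvOkStep r (.quote false)
    else if c = '\\' then pvOkStep r (.quote true)
    else if c = '"' then pvOkStep r .idle
    else pvOkStep r (.quote false)
  | c :: r, .word =>
    if (c = ' ' || c = '\t' || c = '\n' || c = '\r') then pvOkStep r .idle
    else if c = '{' then pvOkStep r (.brace 1)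
    else if c = '}' then false
    else pvOkStep r .word

def Pre_tokenise_switch_body_py (text : String) : Prop := pvOkStep text.toList .idle = true

instance (text : String) : Decidable (Pre_tokenise_switch_body_py text) := by
  unfold Pre_tokenise_switch_body_py; infer_instance

def pvWitness_tokenise_switch_body_py : String := "a {b {c}} \"d e\" f"

def Spec_tokenise_switch_body_py (text : String) (out : List String) : Prop := out = tokenise_switch_body_py_alt text
instance (text : String) (out : List String) : Decidable (Spec_tokenise_switch_body_py text out) := by unfold Spec_tokenise_switch_body_py; infer_instance

-- ===== CLAIM (what is proved, stated in full; the proofs are below) =====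
def Claim_equal_tokenise_switch_body_py : Prop := ∀ (text : String), Dom_tokenise_switch_body_py text → Pre_tokenise_switch_body_py text → Spec_tokenise_switch_body_py text (tokenise_switch_body_py text)

-- ===== LEMMAS AND PROOFS =====
def pvRun (s : List String × PvSt) (l : List Char) : List String :=
  pvFlush (l.foldl pvStepB s)

theorem pvWsB_eq (c : Char) : pvWsB c = pvWsA c := rfl

theorem pvOkStep_cons_idle (c : Char) (r : List Char) :
    pvOkStep (c :: r) .idle
      = (if pvWsA c then pvOkStep r .idle
         else if c = '{' then pvOkStep r (.brace 1)
         else if c = '"' then pvOkStep r (.quote false)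
         else if c = '}' then false
         else pvOkStep r .word) := rfl

theorem pvOkStep_cons_word (c : Char) (r : List Char) :
    pvOkStep (c :: r) .word
      = (if pvWsA c then pvOkStep r .idle
         else if c = '{' then pvOkStep r (.brace 1)
         else if c = '}' then false
         else pvOkStep r .word) := rfl

theorem pvScanQuote_cons (c : Char) (r : List Char) (hq : ¬ c = '"') (hb : ¬ c = '\\') :
    pvScanQuote (c :: r) = (c :: (pvScanQuote r).1, (pvScanQuote r).2) := by
  rw [pvScanQuote.eq_def]
  split
  all_goals simp_all

theorem pvScanBrace_len (d : Nat) (l : List Char) : (pvScanBrace d l).2.length ≤ l.length := by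
  induction l generalizing d with
  | nil => simp [pvScanBrace]
  | cons c r ih =>
    rw [pvScanBrace]
    split
    · simp
    · simpa using Nat.le_succ_of_le (ih _)

theorem pvScanQuote_len (l : List Char) : (pvScanQuote l).2.length ≤ l.length := by
  induction l using pvScanQuote.induct with
  | case1 => simp [pvScanQuote]
  | case2 r => simp [pvScanQuote]
  | case3 => simp [pvScanQuote]
  | case4 c r2 ih =>
    rw [pvScanQuote]
    simpa using Nat.le_succ_of_le (Nat.le_succ_of_le ih)
  | case5 c r h1 h2 h3 ih =>
    have hq : ¬ c = '"' := fun h => h1 h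
    have hb : ¬ c = '\\' := by
      intro h
      cases r with
      | nil => exact h2 h rfl
      | cons a b => exact h3 a b h rfl
    rw [pvScanQuote_cons c r hq hb]
    simpa using Nat.le_succ_of_le ih

theorem pvDepth_zero_iff (d : Nat) (c : Char) (hd : 0 < d) :
    pvDepth d c = 0 ↔ (c = '}' ∧ d = 1) := by
  unfold pvDepth
  split_ifs with h1 h2
  · constructor
    · intro h; exact h.elim
    · rintro ⟨h, -⟩; exact absurd (h1.symm.trans h) (by decide)
  · constructor
    · intro h; exact ⟨h2, by omega⟩
    · rintro ⟨-, h⟩; omega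
  · constructor
    · intro h; exact absurd h (by omega)
    · rintro ⟨hc, -⟩; exact absurd hc h2

theorem pvOkBrace_cons (c : Char) (r : List Char) (d : Nat) (hz : ¬ pvDepth d c = 0) :
    pvOkStep (c :: r) (.brace d) = pvOkStep r (.brace (pvDepth d c)) := by
  by_cases h1 : c = '{'
  · subst h1; simp [pvOkStep, pvDepth]
  · by_cases h2 : c = '}'
    · subst h2
      have hne1 : ¬ d = 1 := by
        intro h; exact hz (by simp [pvDepth, h])
      simp [pvOkStep, pvDepth, h1, hne1]
    · simp [pvOkStep, pvDepth, h1, h2]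

theorem pvOk_brace (r : List Char) (d : Nat) (hd : 0 < d) :
    pvOkStep r (.brace d) = pvOkStep (pvScanBrace d r).2 .idle := by
  induction r generalizing d with
  | nil => simp [pvOkStep, pvScanBrace]
  | cons c r ih =>
    by_cases hz : pvDepth d c = 0
    · obtain ⟨hc, hd1⟩ := (pvDepth_zero_iff d c hd).mp hz
      subst hc; subst hd1
      rw [pvScanBrace, if_pos hz]
      simp [pvOkStep]
    · have hd' : 0 < pvDepth d c := Nat.pos_of_ne_zero hz
      rw [pvScanBrace, if_neg hz, pvOkBrace_cons c r d hz]
      simpa using ih (pvDepth d c) hd'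

theorem pvOk_quote (r : List Char) :
    pvOkStep r (.quote false) = pvOkStep (pvScanQuote r).2 .idle := by
  induction r using pvScanQuote.induct with
  | case1 => simp [pvOkStep, pvScanQuote]
  | case2 r => rw [pvScanQuote]; simp [pvOkStep]
  | case3 => rw [pvScanQuote]; simp [pvOkStep]
  | case4 c r2 ih =>
    rw [pvScanQuote]
    have hstep : pvOkStep ('\\' :: c :: r2) (.quote false) = pvOkStep r2 (.quote false) := by
      simp [pvOkStep]
    rw [hstep]
    simpa using ih
  | case5 c r h1 h2 h3 ih =>
    have hq : ¬ c = '"' := fun h => h1 h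
    have hb : ¬ c = '\\' := by
      intro h
      cases r with
      | nil => exact h2 h rfl
      | cons a b => exact h3 a b h rfl
    rw [pvScanQuote_cons c r hq hb]
    have hstep : pvOkStep (c :: r) (.quote false) = pvOkStep r (.quote false) := by
      simp [pvOkStep, hq, hb]
    rw [hstep]
    simpa using ih

theorem pvOk_word (r : List Char) :
    pvOkStep r .word = pvOkStep (r.dropWhile (fun x => !pvStopA x)) .idle := by
  induction r with
  | nil => rfl
  | cons c r ih =>
    by_cases hstop : pvStopA c
    · have hDW : (c :: r).dropWhile (fun x => !pvStopA x) = c :: r := by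
        simp [List.dropWhile_cons, hstop]
      rw [hDW]
      simp only [pvStopA, Bool.or_eq_true, decide_eq_true_eq] at hstop
      rcases hstop with (hws | hc) | hc
      · rw [pvOkStep_cons_word, pvOkStep_cons_idle, if_pos hws, if_pos hws]
      · subst hc; simp [pvOkStep_cons_word, pvOkStep_cons_idle, pvWsA]
      · subst hc; simp [pvOkStep_cons_word, pvOkStep_cons_idle, pvWsA]
    · have hnw : ¬ pvWsA c := by
        simp only [pvStopA, Bool.or_eq_true] at hstop; tauto
      have hob : ¬ (c = '{') := by
        intro h; apply hstop; simp [pvStopA, h]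
      have hcb : ¬ (c = '}') := by
        intro h; apply hstop; simp [pvStopA, h]
      have hDW : (c :: r).dropWhile (fun x => !pvStopA x)
          = r.dropWhile (fun x => !pvStopA x) := by
        simp [List.dropWhile_cons, hstop]
      rw [hDW, pvOkStep_cons_word, if_neg hnw, if_neg hob, if_neg hcb]
      exact ih

theorem pvStepB_brace_open (toks : List String) (acc : List Char) (d : Nat)
    (c : Char) (hz : ¬ pvDepth d c = 0) :
    pvStepB (toks, .brace acc d) c = (toks, .brace (acc ++ [c]) (pvDepth d c)) := by
  by_cases h1 : c = '{'
  · subst h1; simp [pvStepB, pvDepth]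
  · by_cases h2 : c = '}'
    · subst h2
      have hne1 : ¬ d = 1 := by
        intro h; exact hz (by simp [pvDepth, h])
      simp [pvStepB, pvDepth, h1, hne1]
    · simp [pvStepB, pvDepth, h1, h2]

theorem pvRun_brace (r : List Char) (d : Nat) (acc : List Char) (toks : List String)
    (hd : 0 < d) :
    pvRun (toks, .brace acc d) r
      = pvRun (toks ++ [String.ofList (acc ++ (pvScanBrace d r).1)], .idle) (pvScanBrace d r).2 := by
  induction r generalizing d acc toks with
  | nil => simp [pvRun, pvScanBrace, pvFlush]
  | cons c r ih =>
    by_cases hz : pvDepth d c = 0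
    · obtain ⟨hc, hd1⟩ := (pvDepth_zero_iff d c hd).mp hz
      subst hc; subst hd1
      rw [pvScanBrace, if_pos hz]
      show pvFlush (List.foldl pvStepB (pvStepB (toks, .brace acc 1) '}') r)
        = pvRun (toks ++ [String.ofList (acc ++ ['}'])], .idle) r
      have : pvStepB (toks, .brace acc 1) '}' = (toks ++ [String.ofList (acc ++ ['}'])], .idle) := by
        simp [pvStepB]
      rw [this]; rfl
    · have hd' : 0 < pvDepth d c := Nat.pos_of_ne_zero hz
      rw [pvScanBrace, if_neg hz]
      show pvFlush (List.foldl pvStepB (pvStepB (toks, .brace acc d) c) r)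
        = pvRun (toks ++ [String.ofList (acc ++ (c :: (pvScanBrace (pvDepth d c) r).1,
            (pvScanBrace (pvDepth d c) r).2).1)], .idle)
          (c :: (pvScanBrace (pvDepth d c) r).1, (pvScanBrace (pvDepth d c) r).2).2
      rw [pvStepB_brace_open toks acc d c hz]
      have := ih (pvDepth d c) (acc ++ [c]) toks hd'
      simp only [pvRun] at this ⊢
      rw [this]
      congr 2
      simp

theorem pvRun_quote (r : List Char) (acc : List Char) (toks : List String) :
    pvRun (toks, .quote acc false) r
      = pvRun (toks ++ [String.ofList (acc ++ (pvScanQuote r).1)], .idle) (pvScanQuote r).2 := by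
  induction r using pvScanQuote.induct generalizing acc toks with
  | case1 => simp [pvRun, pvScanQuote, pvFlush]
  | case2 r =>
    rw [pvScanQuote]
    show pvFlush (List.foldl pvStepB (pvStepB (toks, .quote acc false) '"') r) = _
    have : pvStepB (toks, .quote acc false) '"' = (toks ++ [String.ofList (acc ++ ['"'])], .idle) := by
      simp [pvStepB]
    rw [this]; rfl
  | case3 =>
    rw [pvScanQuote]
    show pvFlush (List.foldl pvStepB (pvStepB (toks, .quote acc false) '\\') [])
      = pvRun (toks ++ [String.ofList (acc ++ ['\\'])], .idle) []
    have : pvStepB (toks, .quote acc false) '\\' = (toks, .quote (acc ++ ['\\']) true) := by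
      simp [pvStepB]
    rw [this]
    simp [pvRun, pvFlush]
  | case4 c2 r2 ih =>
    rw [pvScanQuote]
    show pvFlush (List.foldl pvStepB (pvStepB (pvStepB (toks, .quote acc false) '\\') c2) r2) = _
    have h1 : pvStepB (toks, .quote acc false) '\\' = (toks, .quote (acc ++ ['\\']) true) := by
      simp [pvStepB]
    have h2 : pvStepB (toks, .quote (acc ++ ['\\']) true) c2
        = (toks, .quote ((acc ++ ['\\']) ++ [c2]) false) := by
      simp [pvStepB]
    rw [h1, h2]
    have := ih ((acc ++ ['\\']) ++ [c2]) toks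
    simp only [pvRun] at this ⊢
    rw [this]
    congr 3
    simp
  | case5 c r h1 h2 h3 ih =>
    have hq : ¬ c = '"' := fun h => h1 h
    have hb : ¬ c = '\\' := by
      intro h
      cases r with
      | nil => exact h2 h rfl
      | cons a b => exact h3 a b h rfl
    rw [pvScanQuote_cons c r hq hb]
    show pvFlush (List.foldl pvStepB (pvStepB (toks, .quote acc false) c) r) = _
    have hst : pvStepB (toks, .quote acc false) c = (toks, .quote (acc ++ [c]) false) := by
      simp [pvStepB, hq, hb]
    rw [hst]
    have := ih (acc ++ [c]) toks
    simp only [pvRun] at this ⊢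
    rw [this]
    congr 3
    simp

theorem pvRun_word (r : List Char) (acc : List Char) (toks : List String) :
    pvRun (toks, .word acc) r
      = pvRun (toks ++ [String.ofList (acc ++ r.takeWhile (fun x => !pvStopA x))], .idle)
          (r.dropWhile (fun x => !pvStopA x)) := by
  induction r generalizing acc toks with
  | nil => simp [pvRun, pvFlush]
  | cons c r ih =>
    by_cases hstop : pvStopA c
    · have hTW : (c :: r).takeWhile (fun x => !pvStopA x) = [] := by
        simp [hstop]
      have hDW : (c :: r).dropWhile (fun x => !pvStopA x) = c :: r := by
        simp [hstop]
      rw [hTW, hDW]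
      simp only [pvStopA, Bool.or_eq_true, decide_eq_true_eq] at hstop
      rcases hstop with (hws | hc) | hc
      · simp [pvRun, pvStepB, pvWsB_eq, hws]
      · subst hc; simp [pvRun, pvStepB, pvWsB_eq, pvWsA]
      · subst hc; simp [pvRun, pvStepB, pvWsB_eq, pvWsA, List.append_assoc]
    · have hnw : ¬ pvWsA c := by
        simp only [pvStopA, Bool.or_eq_true] at hstop; tauto
      have hob : ¬ (c = '{') := by
        intro h; apply hstop; simp [pvStopA, h]
      have hcb : ¬ (c = '}') := by
        intro h; apply hstop; simp [pvStopA, h]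
      have hTW : (c :: r).takeWhile (fun x => !pvStopA x)
          = c :: r.takeWhile (fun x => !pvStopA x) := by
        simp [hstop]
      have hDW : (c :: r).dropWhile (fun x => !pvStopA x)
          = r.dropWhile (fun x => !pvStopA x) := by
        simp [hstop]
      rw [hTW, hDW]
      show pvFlush (List.foldl pvStepB (pvStepB (toks, .word acc) c) r) = _
      have hst : pvStepB (toks, .word acc) c = (toks, .word (acc ++ [c])) := by
        simp [pvStepB, pvWsB_eq, hnw, hob, hcb]
      rw [hst]
      have := ih (acc ++ [c]) toks
      simp only [pvRun] at this ⊢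
      rw [this]
      congr 3
      simp

theorem pvMain (f : Nat) (l : List Char) (hf : l.length < f) (hok : pvOkStep l .idle = true)
    (toks : List String) : pvRun (toks, .idle) l = toks ++ pvTokA f l := by
  match f, l with
  | f + 1, [] => simp [pvRun, pvTokA, pvFlush]
  | f + 1, c :: r =>
    by_cases hws : pvWsA c
    · have hA : pvTokA (f + 1) (c :: r) = pvTokA (f + 1) r := by
        simp only [pvTokA, List.dropWhile_cons, hws, ite_true]
      rw [hA]
      have hok' : pvOkStep r .idle = true := by
        rw [pvOkStep_cons_idle, if_pos hws] at hok; exact hok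
      have hstep : pvRun (toks, .idle) (c :: r) = pvRun (toks, .idle) r := by
        simp [pvRun, pvStepB, pvWsB_eq, hws]
      rw [hstep]
      exact pvMain (f + 1) r (by simp at hf ⊢; omega) hok' toks
    · have hDW : (c :: r).dropWhile pvWsA = c :: r := by simp [List.dropWhile_cons, hws]
      by_cases hob : c = '{'
      · subst hob
        have hok' : pvOkStep (pvScanBrace 1 r).2 .idle = true := by
          rw [pvOkStep_cons_idle] at hok
          simp only [pvWsA] at hok
          simp at hok
          rwa [pvOk_brace r 1 (by omega)] at hok
        have hlen : (pvScanBrace 1 r).2.length < f := by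
          have h1 := pvScanBrace_len 1 r
          simp at hf; omega
        have hA : pvTokA (f + 1) ('{' :: r)
            = String.ofList ('{' :: (pvScanBrace 1 r).1) :: pvTokA f (pvScanBrace 1 r).2 := by
          simp [pvTokA, hDW]
        rw [hA]
        have hstep : pvRun (toks, .idle) ('{' :: r) = pvRun (toks, .brace ['{'] 1) r := by
          simp [pvRun, pvStepB, pvWsB]
        rw [hstep, pvRun_brace r 1 ['{'] toks (by omega)]
        rw [pvMain f (pvScanBrace 1 r).2 hlen hok' _]
        simp
      · by_cases hq : c = '"'
        · subst hq
          have hok' : pvOkStep (pvScanQuote r).2 .idle = true := by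
            rw [pvOkStep_cons_idle] at hok
            simp only [pvWsA] at hok
            simp at hok
            rwa [pvOk_quote r] at hok
          have hlen : (pvScanQuote r).2.length < f := by
            have h1 := pvScanQuote_len r
            simp at hf; omega
          have hA : pvTokA (f + 1) ('"' :: r)
              = String.ofList ('"' :: (pvScanQuote r).1) :: pvTokA f (pvScanQuote r).2 := by
            simp [pvTokA, hDW]
          rw [hA]
          have hstep : pvRun (toks, .idle) ('"' :: r) = pvRun (toks, .quote ['"'] false) r := by
            simp [pvRun, pvStepB, pvWsB]
          rw [hstep, pvRun_quote r ['"'] toks]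
          rw [pvMain f (pvScanQuote r).2 hlen hok' _]
          simp
        · have hcb : ¬ (c = '}') := by
            intro h
            rw [pvOkStep_cons_idle, if_neg hws, if_neg hob, if_neg hq, if_pos h] at hok
            exact Bool.noConfusion hok
          have hok' : pvOkStep (r.dropWhile (fun x => !pvStopA x)) .idle = true := by
            rw [pvOkStep_cons_idle, if_neg hws, if_neg hob, if_neg hq, if_neg hcb] at hok
            rwa [pvOk_word r] at hok
          have hlen : (r.dropWhile (fun x => !pvStopA x)).length < f := by
            have := List.length_dropWhile_le (fun x => !pvStopA x) r
            simp at hf; omega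
          have hstopc : pvStopA c = false := by
            simp [pvStopA, hws, hob, hcb]
          have hA : pvTokA (f + 1) (c :: r)
              = String.ofList (c :: r.takeWhile (fun x => !pvStopA x))
                :: pvTokA f (r.dropWhile (fun x => !pvStopA x)) := by
            simp only [pvTokA, hDW, if_neg hob, if_neg hq, List.takeWhile_cons,
              List.dropWhile_cons, hstopc, Bool.not_false, ite_true]
          rw [hA]
          have hstep : pvRun (toks, .idle) (c :: r) = pvRun (toks, .word [c]) r := by
            simp [pvRun, pvStepB, pvWsB_eq, hws, hob, hq, hcb]
          rw [hstep, pvRun_word r [c] toks]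
          rw [pvMain f _ hlen hok' _]
          simp
termination_by l.length
decreasing_by
  · simp
  · have h1 := pvScanBrace_len 1 r
    exact Nat.lt_succ_of_le h1
  · have h1 := pvScanQuote_len r
    exact Nat.lt_succ_of_le h1
  · exact Nat.lt_succ_of_le (List.length_dropWhile_le _ _)

-- ===== VERDICT (by name: the statement is the Claim_ definition above) =====
theorem tokenise_switch_body_py_spec : Claim_equal_tokenise_switch_body_py := by
  intro text _ hpre
  unfold Spec_tokenise_switch_body_py tokenise_switch_body_py tokenise_switch_body_py_alt
  have := pvMain (text.toList.length + 1) text.toList (by omega) hpre []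
  simpa [pvRun] using this.symm
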